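-- pv_equiv track=rewrite | github.com/Microchip-MPLAB-Harmony/csp | peripheral/smc_6105/config/smc.py | convertMaskToInt
-- ===== SOURCE A (Python) =====
-- def convertMaskToInt( aRegMask ):
--     """ function to convert bit field mask string to integer -- assumes mask is contiguous bits"""
--     numBits = 0;
--     aBinStr = '{0:32b}'.format(int( aRegMask, 16 )).strip().rstrip( "0" )
--     while len( aBinStr ):
--         aBinCh = aBinStr[-1]
--         aBinStr = aBinStr[0:-1]
--         if aBinCh == '1':
--             numBits += 1
--         else:
--             break
--     return ((2**numBits) - 1)       # return max value field can contain
-- ===== SOURCE B (Python) =====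
-- def convertMaskToInt( aRegMask ):
--     """ bit arithmetic instead of binary-string manipulation: strip trailing zero
--     bits, count the contiguous run of low set bits, return its max value """
--     n = abs(int(aRegMask, 16))
--     while n and n & 1 == 0:
--         n >>= 1
--     count = 0
--     while n & 1:
--         count += 1
--         n >>= 1
--     return (1 << count) - 1
-- ===== Notes on version B (the rewrite author's own statement) =====
-- stated objective: idiomatic
-- what changed: replaces format-to-binary-string, strip/rstrip and a character loop with pure bit arithmetic on the parsed integer (shift off trailing zero bits, count the low run of set bits, return (1<<count)-1)
import Mathlib
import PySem

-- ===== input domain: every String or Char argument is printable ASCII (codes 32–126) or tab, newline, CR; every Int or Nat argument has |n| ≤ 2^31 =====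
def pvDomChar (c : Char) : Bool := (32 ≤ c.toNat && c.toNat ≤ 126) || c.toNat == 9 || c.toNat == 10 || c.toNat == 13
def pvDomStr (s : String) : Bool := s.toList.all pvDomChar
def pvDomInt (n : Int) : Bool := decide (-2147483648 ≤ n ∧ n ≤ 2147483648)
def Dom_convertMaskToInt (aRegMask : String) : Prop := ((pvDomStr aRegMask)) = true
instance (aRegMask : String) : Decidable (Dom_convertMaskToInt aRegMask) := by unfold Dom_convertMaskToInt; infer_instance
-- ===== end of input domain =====

-- B replaces A's binary-string formatting/stripping/character loop with bit arithmetic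
-- on the parsed integer (idiomatic; same result wherever int(aRegMask, 16) succeeds).


-- ===== PORT A =====

-- binary digits of m, least significant first (hand port of '{0:b}' of a Nat; exact)
def pvRevBits (m : Nat) : List Char :=
  if h : m = 0 then [] else (if m % 2 = 1 then '1' else '0') :: pvRevBits (m / 2)
  decreasing_by exact Nat.div_lt_self (Nat.pos_of_ne_zero h) one_lt_two

-- '{0:32b}'.format(n): binary digits of |n| with a '-' sign for n < 0,
-- right-aligned (left-padded with spaces) to minimum width 32 (hand port, exact)
def pvFormat32b (n : Int) : List Char :=
  let digits := if n = 0 then ['0'] else (pvRevBits n.natAbs).reverse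
  let signed := (if n < 0 then ['-'] else []) ++ digits
  List.replicate (32 - signed.length) ' ' ++ signed

-- A's while loop: aBinCh = aBinStr[-1]; aBinStr = aBinStr[0:-1]; count '1's, else break
def pvALoop (s : List Char) (numBits : Nat) : Nat :=
  if s.length = 0 then numBits
  else
    let aBinCh := s.getLast!        -- aBinStr[-1] (s nonempty here)
    let s' := s.dropLast            -- aBinStr[0:-1]
    if aBinCh = '1' then pvALoop s' (numBits + 1) else numBits
  termination_by s.length
  decreasing_by simp only [List.length_dropLast]; omega

def convertMaskToInt (aRegMask : String) : Int :=
  match PySem.Int.ofStrBase? aRegMask 16 with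
  | none => 0   -- int(aRegMask, 16) raises ValueError; excluded by Pre_
  | some n =>
    -- .strip().rstrip("0")  (rstrip with the single explicit char '0': hand port, exact)
    let aBinStr := ((PySem.Chars.strip (pvFormat32b n)).reverse.dropWhile (· == '0')).reverse
    ((2 : Int) ^ (pvALoop aBinStr 0)) - 1

-- ===== PORT B =====

-- while n and n & 1 == 0: n >>= 1
def pvStripZeros (n : Nat) : Nat :=
  if h : n ≠ 0 ∧ n &&& 1 = 0 then pvStripZeros (n >>> 1) else n
  decreasing_by simp only [Nat.shiftRight_one]; exact Nat.div_lt_self (Nat.pos_of_ne_zero h.1) one_lt_two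

-- while n & 1: count += 1; n >>= 1
def pvCountOnes (n : Nat) : Nat :=
  if h : n &&& 1 = 1 then pvCountOnes (n >>> 1) + 1 else 0
  decreasing_by
    simp only [Nat.shiftRight_one]
    refine Nat.div_lt_self (Nat.pos_of_ne_zero ?_) one_lt_two
    intro h0; rw [h0] at h; simp at h

def convertMaskToInt_alt (aRegMask : String) : Int :=
  match PySem.Int.ofStrBase? aRegMask 16 with
  | none => 0   -- ValueError; excluded by Pre_
  | some v =>
    let n := pvStripZeros v.natAbs
    let count := pvCountOnes n
    ((1 <<< count : Nat) : Int) - 1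

-- ===== PRECONDITION & SPEC =====
-- Pre_ excludes exactly the inputs on which int(aRegMask, 16) raises ValueError in A.
def Pre_convertMaskToInt (aRegMask : String) : Prop :=
  (PySem.Int.ofStrBase? aRegMask 16).isSome = true
instance (aRegMask : String) : Decidable (Pre_convertMaskToInt aRegMask) := by
  unfold Pre_convertMaskToInt; infer_instance

def pvWitness_convertMaskToInt : String := "1c"

def Spec_convertMaskToInt (aRegMask : String) (out : Int) : Prop := out = convertMaskToInt_alt aRegMask
instance (aRegMask : String) (out : Int) : Decidable (Spec_convertMaskToInt aRegMask out) := by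
  unfold Spec_convertMaskToInt; infer_instance

-- ===== CLAIM (what is proved, stated in full; the proofs are below) =====
def Claim_equal_convertMaskToInt : Prop := ∀ (aRegMask : String), Dom_convertMaskToInt aRegMask → Pre_convertMaskToInt aRegMask → Spec_convertMaskToInt aRegMask (convertMaskToInt aRegMask)

-- ===== LEMMAS AND PROOFS =====

theorem pvStripZeros_eq (n : Nat) :
    pvStripZeros n = if n ≠ 0 ∧ n % 2 = 0 then pvStripZeros (n / 2) else n := by
  rw [pvStripZeros]
  simp [Nat.and_one_is_mod, Nat.shiftRight_one]

theorem pvCountOnes_eq (n : Nat) :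
    pvCountOnes n = if n % 2 = 1 then pvCountOnes (n / 2) + 1 else 0 := by
  rw [pvCountOnes]
  simp [Nat.and_one_is_mod, Nat.shiftRight_one]

-- every character of the digit list is '0' or '1'
theorem pvRevBits_mem (m : Nat) : ∀ c ∈ pvRevBits m, c = '0' ∨ c = '1' := by
  induction m using Nat.strong_induction_on with
  | _ m ih =>
    rw [pvRevBits]
    split
    · simp
    · next h =>
      intro c hc
      rcases List.mem_cons.1 hc with h1 | h1
      · subst h1; split_ifs <;> simp
      · exact ih (m / 2) (Nat.div_lt_self (Nat.pos_of_ne_zero h) one_lt_two) c h1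

theorem pvRevBits_ne_nil {m : Nat} (h : m ≠ 0) : pvRevBits m ≠ [] := by
  rw [pvRevBits]; simp [h]

theorem pvStripZeros_ne_zero (m : Nat) : m ≠ 0 → pvStripZeros m ≠ 0 := by
  induction m using Nat.strong_induction_on with
  | _ m ih =>
    intro h
    rw [pvStripZeros_eq]
    split
    · next hc =>
      exact ih (m / 2) (Nat.div_lt_self (Nat.pos_of_ne_zero h) one_lt_two)
        (by rcases hc with ⟨_, h2⟩; omega)
    · exact h

-- stripping trailing '0' digits is dividing out the trailing zero bits
theorem pvDropZeros (m : Nat) :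
    (pvRevBits m).dropWhile (· == '0') = pvRevBits (pvStripZeros m) := by
  induction m using Nat.strong_induction_on with
  | _ m ih =>
    by_cases h0 : m = 0
    · subst h0
      rw [pvStripZeros_eq]
      simp [pvRevBits]
    · by_cases hpar : m % 2 = 0
      · have hstrip : pvStripZeros m = pvStripZeros (m / 2) := by
          rw [pvStripZeros_eq, if_pos ⟨h0, hpar⟩]
        rw [hstrip, ← ih (m / 2) (Nat.div_lt_self (Nat.pos_of_ne_zero h0) one_lt_two)]
        conv_lhs => rw [pvRevBits]
        simp only [h0, dite_false, if_neg (by omega : ¬ m % 2 = 1), List.dropWhile_cons]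
        norm_num
      · have h1 : m % 2 = 1 := by omega
        have hstrip : pvStripZeros m = m := by
          rw [pvStripZeros_eq, if_neg (by omega)]
        rw [hstrip]
        conv_lhs => rw [pvRevBits]
        conv_rhs => rw [pvRevBits]
        simp only [h0, dite_false, h1, if_pos, List.dropWhile_cons]
        norm_num
        exact fun hx => absurd hx (by decide)

-- A's character loop over the reversed digit list counts exactly B's low run of set bits
theorem pvALoop_revBits (m : Nat) : ∀ (tail : List Char), (∀ c ∈ tail, c ≠ '1') →
    ∀ k, pvALoop ((pvRevBits m ++ tail).reverse) k = k + pvCountOnes m := by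
  induction m using Nat.strong_induction_on with
  | _ m ih =>
    intro tail htail k
    by_cases h0 : m = 0
    · subst h0
      have hc0 : pvCountOnes 0 = 0 := by rw [pvCountOnes_eq]; simp
      rw [hc0, Nat.add_zero, pvRevBits]
      simp only [dite_true, List.nil_append]
      rw [pvALoop.eq_def]
      rcases tail with _ | ⟨c, rest⟩
      · simp
      · have hlast : (c :: rest).reverse.getLast! = c := by
          simp [List.getLast!_eq_getLast?_getD, List.getLast?_reverse]
        simp only [List.length_reverse, List.length_cons, hlast]
        rw [if_neg (by simp), if_neg (htail c (by simp))]
    · rw [pvRevBits]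
      simp only [h0, dite_false, List.cons_append, List.reverse_cons]
      rw [pvALoop.eq_def]
      have hdl : ((pvRevBits (m / 2) ++ tail).reverse ++ [if m % 2 = 1 then '1' else '0']).dropLast
          = (pvRevBits (m / 2) ++ tail).reverse := List.dropLast_concat
      have hgl : ((pvRevBits (m / 2) ++ tail).reverse ++ [if m % 2 = 1 then '1' else '0']).getLast!
          = (if m % 2 = 1 then '1' else '0') := by
        simp [List.getLast!_eq_getLast?_getD]
      simp only [List.length_append, List.length_reverse, List.length_cons, hdl, hgl]
      rw [if_neg (by simp)]
      by_cases hpar : m % 2 = 1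
      · rw [if_pos (by simp [hpar])]
        rw [ih (m / 2) (Nat.div_lt_self (Nat.pos_of_ne_zero h0) one_lt_two) tail htail (k + 1)]
        conv_rhs => rw [pvCountOnes_eq, if_pos hpar]
        omega
      · rw [if_neg (by simp [hpar])]
        conv_rhs => rw [pvCountOnes_eq, if_neg hpar]
        omega

theorem pvIsspace_bits (c : Char) (h : c = '-' ∨ c = '0' ∨ c = '1') :
    PySem.Chars.isspace c = false := by
  rcases h with h | h | h <;> subst h <;> decide

-- strip of the space-padded digit string gives back the unpadded string
theorem pvStrip_pad (k : Nat) (l : List Char) (h : ∀ c ∈ l, PySem.Chars.isspace c = false) :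
    PySem.Chars.strip (List.replicate k ' ' ++ l) = l := by
  have hself : List.dropWhile PySem.Chars.isspace l = l := by
    rw [List.dropWhile_eq_self_iff]
    intro hl
    simp [h _ (List.getElem_mem hl)]
  have h1 : PySem.Chars.lstrip (List.replicate k ' ' ++ l) = l := by
    unfold PySem.Chars.lstrip
    rw [List.dropWhile_append]
    have hz : List.dropWhile PySem.Chars.isspace (List.replicate k ' ') = [] := by
      induction k with
      | zero => simp
      | succ k ihk =>
        rw [List.replicate_succ, List.dropWhile_cons,
          (by decide : PySem.Chars.isspace ' ' = true)]
        simpa using ihk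
    rw [hz]
    simpa using hself
  have h2 : PySem.Chars.rstrip l = l := by
    unfold PySem.Chars.rstrip
    rw [List.dropWhile_eq_self_iff.2 ?_, l.reverse_reverse]
    intro hl
    simp only [List.getElem_reverse]
    exact fun hx => absurd hx (by simp [h _ (List.getElem_mem _)])
  unfold PySem.Chars.strip
  rw [h1, h2]

-- the two counts agree for every parsed integer n
theorem pvCore (n : Int) :
    pvALoop (((PySem.Chars.strip (pvFormat32b n)).reverse.dropWhile (· == '0')).reverse) 0
      = pvCountOnes (pvStripZeros n.natAbs) := by
  by_cases h0 : n = 0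
  · subst h0
    have hfmt : pvFormat32b 0 = List.replicate 31 ' ' ++ ['0'] := by
      unfold pvFormat32b; norm_num
    rw [hfmt, pvStrip_pad 31 ['0'] (fun c hc => by
      rw [List.mem_singleton] at hc; subst hc; decide)]
    rw [pvCountOnes_eq, pvStripZeros_eq]
    norm_num
    rw [pvALoop]
    simp
  · have hm0 : n.natAbs ≠ 0 := by simpa using h0
    have hfmt : pvFormat32b n =
        List.replicate (32 - ((if n < 0 then ['-'] else []) ++ (pvRevBits n.natAbs).reverse).length) ' '
          ++ ((if n < 0 then ['-'] else []) ++ (pvRevBits n.natAbs).reverse) := by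
      unfold pvFormat32b; rw [if_neg h0]
    have hmem : ∀ c ∈ (if n < 0 then ['-'] else []) ++ (pvRevBits n.natAbs).reverse,
        PySem.Chars.isspace c = false := by
      intro c hc
      apply pvIsspace_bits
      rcases List.mem_append.1 hc with h1 | h1
      · left; revert h1; split <;> simp_all
      · right; exact pvRevBits_mem n.natAbs c (List.mem_reverse.1 h1)
    rw [hfmt, pvStrip_pad _ _ hmem]
    rw [List.reverse_append, List.reverse_reverse, List.dropWhile_append, pvDropZeros]
    have hne : pvRevBits (pvStripZeros n.natAbs) ≠ [] :=
      pvRevBits_ne_nil (pvStripZeros_ne_zero n.natAbs hm0)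
    rw [if_neg (by simpa [List.isEmpty_iff] using hne)]
    have htail : ∀ c ∈ (if n < 0 then ['-'] else ([] : List Char)).reverse, c ≠ '1' := by
      intro c hc
      rw [List.mem_reverse] at hc
      revert hc; split <;> simp_all
    rw [pvALoop_revBits (pvStripZeros n.natAbs) _ htail 0]
    omega

-- ===== VERDICT (by name: the statement is the Claim_ definition above) =====
theorem convertMaskToInt_spec : Claim_equal_convertMaskToInt := by
  intro s _ hpre
  unfold Spec_convertMaskToInt convertMaskToInt convertMaskToInt_alt
  rcases hsome : PySem.Int.ofStrBase? s 16 with _ | n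
  · simp [Pre_convertMaskToInt, hsome] at hpre
  · show ((2 : Int) ^ (pvALoop (((PySem.Chars.strip (pvFormat32b n)).reverse.dropWhile (· == '0')).reverse) 0)) - 1
        = ((1 <<< pvCountOnes (pvStripZeros n.natAbs) : Nat) : Int) - 1
    rw [pvCore n]
    push_cast [Nat.one_shiftLeft]
    ring
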